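-- pv_equiv track=rewrite | github.com/Punkster81/divide-by | divide-by-noita-way.py | find_best_groups
-- ===== SOURCE A (Python) =====
-- def find_best_groups(target, products):
--     """
--     Find the best way to sum to target using products
--     Returns: (groups, total_spaces_for_numbers, has_any_overflow, has_any_draw_cancel) or None
--     """
--     if target == 0:
--         return [], 0, False, False
--
--     if target < 0:
--         return None
--
--     # dp[i] = (groups, spaces_for_numbers, has_any_overflow, has_any_draw_cancel)
--     dp = [None] * (target + 1)
--     dp[0] = ([], 0, False, False)
--
--     for i in range(1, target + 1):
--         best = None
--         best_spaces = float('inf')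
--
--         for product, combo_list in products.items():
--             if product > i:
--                 continue
--
--             prev = dp[i - product]
--             if prev is None:
--                 continue
--
--             prev_groups, prev_spaces, prev_overflow, prev_draw_cancel = prev
--
--             # Try each combo for this product
--             for combo, overflow_count, draw_cancel in combo_list:
--                 new_spaces = prev_spaces + len(combo)
--
--                 if new_spaces < best_spaces:
--                     best_spaces = new_spaces
--                     best = (
--                         prev_groups + [(combo, overflow_count, draw_cancel)],
--                         new_spaces,
--                         prev_overflow or overflow_count > 0,
--                         prev_draw_cancel or draw_cancel
--                     )
--
--         dp[i] = best
--
--     if dp[target] is None: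
--         return None
--
--     return dp[target]
-- ===== SOURCE B (Python) =====
-- def find_best_groups(target, products):
--     """
--     Find the best way to sum to target using products.
--     Different algorithm: keep only the first minimal-length combo per product
--     (the only combo the strict '<' minimisation can ever pick), run a scalar
--     DP over (min spaces, last product used), and rebuild the chosen groups
--     once at the end by backtracking, instead of copying a groups list into
--     every dp cell.
--     Returns: (groups, total_spaces_for_numbers, has_any_overflow, has_any_draw_cancel) or None
--     """
--     if target == 0:
--         return [], 0, False, False
--     if target < 0:
--         return None
--
--     # one (product, first minimal-length combo entry) pair per product
--     items = []
--     for product, combo_list in products.items():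
--         chosen = None
--         for entry in combo_list:
--             if chosen is None or len(entry[0]) < len(chosen[0]):
--                 chosen = entry
--         if chosen is not None:
--             items.append((product, chosen))
--     entry_of = dict(items)
--
--     # cost[i] = (minimal spaces to reach i, product used at the last step) or None
--     cost = [None] * (target + 1)
--     cost[0] = (0, 0)  # the product stored at 0 is never read: backtracking stops there
--     for i in range(1, target + 1):
--         best = None
--         for product, entry in items:
--             if product > i:
--                 continue
--             prev = cost[i - product]
--             if prev is None:
--                 continue
--             ns = prev[0] + len(entry[0])
--             if best is None or ns < best[0]:
--                 best = (ns, product)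
--         cost[i] = best
--
--     if cost[target] is None:
--         return None
--
--     groups = []
--     i = target
--     while i > 0:
--         product = cost[i][1]
--         groups.append(entry_of[product])
--         i -= product
--     groups.reverse()
--     return (groups, cost[target][0],
--             any(oc > 0 for _, oc, _ in groups),
--             any(dc for _, _, dc in groups))
-- ===== Notes on version B (the rewrite author's own statement) =====
-- stated objective: alternative
-- what changed: B precomputes, once per product, the first minimal-length combo (the only one the strict '<' minimisation can ever pick) so the DP inner loop tries one candidate per product instead of rescanning every combo list, and the DP table holds only (spaces, last product) scalars instead of a copied groups list per cell, the groups being rebuilt once at the end by backtracking; Pre_ additionally requires distinct product keys (automatic for a Python dict argument) and excludes negative products, on which both programs raise IndexError.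
import Mathlib
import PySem

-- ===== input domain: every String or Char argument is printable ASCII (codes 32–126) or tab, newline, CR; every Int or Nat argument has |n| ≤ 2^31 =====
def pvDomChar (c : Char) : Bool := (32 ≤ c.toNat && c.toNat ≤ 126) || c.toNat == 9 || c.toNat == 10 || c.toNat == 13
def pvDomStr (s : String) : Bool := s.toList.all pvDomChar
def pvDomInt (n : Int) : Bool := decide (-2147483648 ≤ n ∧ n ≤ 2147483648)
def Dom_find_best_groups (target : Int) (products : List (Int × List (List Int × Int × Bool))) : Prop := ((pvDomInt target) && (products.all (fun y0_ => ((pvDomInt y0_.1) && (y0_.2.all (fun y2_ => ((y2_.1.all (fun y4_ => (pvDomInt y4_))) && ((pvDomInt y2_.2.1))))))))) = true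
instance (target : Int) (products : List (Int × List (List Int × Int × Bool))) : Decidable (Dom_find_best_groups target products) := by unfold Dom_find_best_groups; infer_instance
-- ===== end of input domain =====

-- B keeps one minimal-length combo per product and runs a scalar (spaces, last product)
-- DP, rebuilding the groups once by backtracking; return values proved equal on Pre_.


-- ===== PORT A =====
-- A's candidate tuple: (prev_groups + [(combo, overflow_count, draw_cancel)], new_spaces, …)
def pvCand (prev : (List (List Int × Int × Bool)) × Int × Bool × Bool)
    (c : List Int × Int × Bool) : (List (List Int × Int × Bool)) × Int × Bool × Bool :=
  (prev.1 ++ [c], prev.2.1 + (c.1.length : Int), prev.2.2.1 || decide (0 < c.2.1), prev.2.2.2 || c.2.2)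

-- A's innermost loop body; acc = (best, best_spaces), best_spaces = none models float('inf')
def pvStepA (prev : (List (List Int × Int × Bool)) × Int × Bool × Bool)
    (acc : Option ((List (List Int × Int × Bool)) × Int × Bool × Bool) × Option Int)
    (c : List Int × Int × Bool) :
    Option ((List (List Int × Int × Bool)) × Int × Bool × Bool) × Option Int :=
  let ns := prev.2.1 + (c.1.length : Int)
  match acc.2 with
  | none => (some (pvCand prev c), some ns)
  | some bs => if ns < bs then (some (pvCand prev c), some ns) else acc

-- A's body of the loop over products.items()
def pvProdA (dp : List (Option ((List (List Int × Int × Bool)) × Int × Bool × Bool))) (i : Int)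
    (acc : Option ((List (List Int × Int × Bool)) × Int × Bool × Bool) × Option Int)
    (e : Int × List (List Int × Int × Bool)) :
    Option ((List (List Int × Int × Bool)) × Int × Bool × Bool) × Option Int :=
  if e.1 > i then acc
  else
    match (PySem.List.pyGet? dp (i - e.1)).getD none with
    | none => acc
    | some prev => e.2.foldl (pvStepA prev) acc

def find_best_groups (target : Int) (products : List (Int × List (List Int × Int × Bool))) : Option ((List (List Int × Int × Bool)) × Int × Bool × Bool) :=
  if target = 0 then some ([], 0, false, false)
  else if target < 0 then none
  else
    let dp0 := (List.replicate (target + 1).toNat (none : Option ((List (List Int × Int × Bool)) × Int × Bool × Bool))).set 0 (some ([], 0, false, false))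
    let dp := (PySem.List.pyRange 1 (target + 1) 1).foldl
      (fun dp i => dp.set i.toNat (products.foldl (pvProdA dp i) (none, none)).1) dp0
    match (PySem.List.pyGet? dp target).getD none with
    | none => none
    | some v => some v

-- ===== PORT B =====
-- B's inner scan of a combo list: chosen = first entry of minimal combo length
def pvMinCombo (cl : List (List Int × Int × Bool)) : Option (List Int × Int × Bool) :=
  cl.foldl (fun ch c =>
    match ch with
    | none => some c
    | some b => if c.1.length < b.1.length then some c else ch) none

-- B's items list: one (product, minimal combo entry) pair per product, in products order
def pvItems (products : List (Int × List (List Int × Int × Bool))) :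
    List (Int × (List Int × Int × Bool)) :=
  products.foldl (fun acc e =>
    match pvMinCombo e.2 with
    | none => acc
    | some b => acc ++ [(e.1, b)]) []

-- entry_of = dict(items); lookup = first match (exact: Pre_ makes the keys distinct)
def pvLookup (items : List (Int × (List Int × Int × Bool))) (p : Int) :
    Option (List Int × Int × Bool) :=
  (items.find? (fun q => q.1 == p)).map (fun q => q.2)

-- B's dp inner loop body over items; cost cells are (spaces, last product)
def pvScan (cost : List (Option (Int × Int))) (i : Int)
    (best : Option (Int × Int)) (pe : Int × (List Int × Int × Bool)) : Option (Int × Int) :=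
  if pe.1 > i then best
  else
    match (PySem.List.pyGet? cost (i - pe.1)).getD none with
    | none => best
    | some prev =>
      let ns := prev.1 + (pe.2.1.length : Int)
      match best with
      | none => some (ns, pe.1)
      | some bb => if ns < bb.1 then some (ns, pe.1) else best

-- B's backtracking while-loop; fuel = target (each step subtracts a product ≥ 1,
-- so fuel never runs out on B's own table); a missing cell / key stops the walk
-- (unreachable: python would raise there, and B's own table never leads there)
def pvWalk (cost : List (Option (Int × Int))) (items : List (Int × (List Int × Int × Bool))) :
    Nat → Int → List (List Int × Int × Bool) → List (List Int × Int × Bool)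
  | 0, _, acc => acc
  | fuel + 1, i, acc =>
    if 0 < i then
      match (PySem.List.pyGet? cost i).getD none with
      | none => acc
      | some c =>
        match pvLookup items c.2 with
        | none => acc
        | some e => pvWalk cost items fuel (i - c.2) (acc ++ [e])
    else acc

def find_best_groups_alt (target : Int) (products : List (Int × List (List Int × Int × Bool))) : Option ((List (List Int × Int × Bool)) × Int × Bool × Bool) :=
  if target = 0 then some ([], 0, false, false)
  else if target < 0 then none
  else
    let items := pvItems products
    let cost0 := (List.replicate (target + 1).toNat (none : Option (Int × Int))).set 0 (some (0, 0))
    let cost := (PySem.List.pyRange 1 (target + 1) 1).foldl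
      (fun cost i => cost.set i.toNat (items.foldl (pvScan cost i) none)) cost0
    match (PySem.List.pyGet? cost target).getD none with
    | none => none
    | some c =>
      let groups := (pvWalk cost items target.toNat target []).reverse
      some (groups, c.1,
            groups.any (fun e => decide (0 < e.2.1)),
            groups.any (fun e => e.2.2))

-- ===== PRECONDITION & SPEC =====
-- Pre_ excludes (a) negative product keys when target ≥ 1: there BOTH Pythons raise
-- IndexError (dp[i - product] / cost[i - product] index past the end of the table);
-- (b) duplicate product keys, which cannot occur at all for `products`, a Python dict.
def Pre_find_best_groups (target : Int) (products : List (Int × List (List Int × Int × Bool))) : Prop :=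
  (1 ≤ target → ∀ e ∈ products, 0 ≤ e.1) ∧ (products.map Prod.fst).Nodup
instance (target : Int) (products : List (Int × List (List Int × Int × Bool))) : Decidable (Pre_find_best_groups target products) := by unfold Pre_find_best_groups; infer_instance
def pvWitness_find_best_groups : Int × (List (Int × List (List Int × Int × Bool))) :=
  (3, [(1, [([2], 0, true)]), (2, [([1, 1], 1, false), ([4], 0, false)])])

def Spec_find_best_groups (target : Int) (products : List (Int × List (List Int × Int × Bool))) (out : Option ((List (List Int × Int × Bool)) × Int × Bool × Bool)) : Prop := out = find_best_groups_alt target products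
instance (target : Int) (products : List (Int × List (List Int × Int × Bool))) (out : Option ((List (List Int × Int × Bool)) × Int × Bool × Bool)) : Decidable (Spec_find_best_groups target products out) := by unfold Spec_find_best_groups; infer_instance

-- ===== CLAIM (what is proved, stated in full; the proofs are below) =====
def Claim_equal_find_best_groups : Prop := ∀ (target : Int) (products : List (Int × List (List Int × Int × Bool))), Dom_find_best_groups target products → Pre_find_best_groups target products → Spec_find_best_groups target products (find_best_groups target products)

-- ===== LEMMAS AND PROOFS =====

-- ghost dp cell: chain of chosen (product, entry) pairs (newest first) + spaces + flags
abbrev PvEntry := List Int × Int × Bool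
abbrev PvGCell := (List (Int × PvEntry)) × Int × Bool × Bool

def gStep (prev : PvGCell) (pe : Int × PvEntry) : PvGCell :=
  (pe :: prev.1, prev.2.1 + (pe.2.1.length : Int),
   prev.2.2.1 || decide (0 < pe.2.2.1), prev.2.2.2 || pe.2.2.2)

-- the shared comparison step ("new_spaces strictly better than best")
def gCmp (prev : PvGCell) (acc : Option PvGCell) (pe : Int × PvEntry) : Option PvGCell :=
  let ns := prev.2.1 + (pe.2.1.length : Int)
  match acc with
  | none => some (gStep prev pe)
  | some b => if ns < b.2.1 then some (gStep prev pe) else acc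

def readD (g : List (Option PvGCell)) (j : Int) : Option PvGCell :=
  (PySem.List.pyGet? g j).getD none

def gScan (g : List (Option PvGCell)) (i : Int) (acc : Option PvGCell) (pe : Int × PvEntry) :
    Option PvGCell :=
  if pe.1 > i then acc
  else
    match readD g (i - pe.1) with
    | none => acc
    | some prev => gCmp prev acc pe

def gTable (target : Int) (items : List (Int × PvEntry)) : List (Option PvGCell) :=
  (PySem.List.pyRange 1 (target + 1) 1).foldl
    (fun g i => g.set i.toNat (items.foldl (gScan g i) none))
    ((List.replicate (target + 1).toNat (none : Option PvGCell)).set 0 (some ([], 0, false, false)))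

-- rendering a ghost cell as A's dp cell and as B's cost cell
def rA (g : PvGCell) : (List PvEntry) × Int × Bool × Bool := ((g.1.map Prod.snd).reverse, g.2)
def rB (g : PvGCell) : Int × Int := (g.2.1, (g.1.headD (0, ([], 0, false))).1)

-- ---------- A-side simulation ----------

theorem pvStepA_pair (prev : PvGCell) (b : Option PvGCell) (p : Int) (c : PvEntry) :
    pvStepA (rA prev) (b.map rA, b.map (fun r => r.2.1)) c
      = ((gCmp prev b (p, c)).map rA, (gCmp prev b (p, c)).map (fun r => r.2.1)) := by
  cases b with
  | none => simp [pvStepA, gCmp, pvCand, gStep, rA]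
  | some v =>
    simp only [pvStepA, gCmp, Option.map_some, rA]
    split_ifs <;> simp [pvCand, gStep, rA]

theorem pvFoldA_pair (cl : List PvEntry) (prev : PvGCell) (p : Int) (b : Option PvGCell) :
    cl.foldl (pvStepA (rA prev)) (b.map rA, b.map (fun r => r.2.1))
      = ((cl.foldl (fun a c => gCmp prev a (p, c)) b).map rA,
         (cl.foldl (fun a c => gCmp prev a (p, c)) b).map (fun r => r.2.1)) := by
  induction cl generalizing b with
  | nil => rfl
  | cons c cl ih => simp only [List.foldl_cons, pvStepA_pair prev b p c, ih]

-- exchange law: two comparison steps collapse to one with the shorter combo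
theorem gCmp_exchange (prev : PvGCell) (b : Option PvGCell) (p : Int) (m c : PvEntry) :
    gCmp prev (gCmp prev b (p, m)) (p, c)
      = gCmp prev b (p, if c.1.length < m.1.length then c else m) := by
  cases b with
  | none =>
    simp only [gCmp, gStep]
    split_ifs <;> simp_all
  | some v =>
    simp only [gCmp, gStep]
    split_ifs <;> simp_all <;> omega

def pvMinW (m : PvEntry) (cl : List PvEntry) : PvEntry :=
  cl.foldl (fun b c => if c.1.length < b.1.length then c else b) m

theorem pvFoldB_min (cl : List PvEntry) (prev : PvGCell) (p : Int) (m : PvEntry)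
    (b : Option PvGCell) :
    cl.foldl (fun a c => gCmp prev a (p, c)) (gCmp prev b (p, m))
      = gCmp prev b (p, pvMinW m cl) := by
  induction cl generalizing m b with
  | nil => rfl
  | cons c cl ih =>
    simp only [List.foldl_cons, gCmp_exchange, pvMinW]
    exact ih _ _

theorem pvMinCombo_some (cl : List PvEntry) (m : PvEntry) :
    cl.foldl (fun ch c =>
      match ch with
      | none => some c
      | some b => if c.1.length < b.1.length then some c else ch) (some m)
      = some (pvMinW m cl) := by
  induction cl generalizing m with
  | nil => rfl
  | cons c cl ih =>
    simp only [List.foldl_cons, pvMinW]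
    split_ifs <;> exact ih _

theorem pvMinCombo_cons (c : PvEntry) (cl : List PvEntry) :
    pvMinCombo (c :: cl) = some (pvMinW c cl) := by
  simp only [pvMinCombo, List.foldl_cons]
  exact pvMinCombo_some cl c

def pvH (e : Int × List PvEntry) : List (Int × PvEntry) :=
  match pvMinCombo e.2 with
  | none => []
  | some b => [(e.1, b)]

theorem pvItems_acc (l : List (Int × List PvEntry)) (acc : List (Int × PvEntry)) :
    l.foldl (fun acc e =>
      match pvMinCombo e.2 with
      | none => acc
      | some b => acc ++ [(e.1, b)]) acc = acc ++ l.flatMap pvH := by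
  induction l generalizing acc with
  | nil => simp
  | cons e l ih =>
    simp only [List.foldl_cons, List.flatMap_cons, pvH]
    cases h : pvMinCombo e.2 <;> simp [ih]

theorem pvItems_eq (l : List (Int × List PvEntry)) : pvItems l = l.flatMap pvH := by
  simpa using pvItems_acc l []

-- indexing commutes with mapping the table
theorem pvGet_map {α β : Type} (f : α → β) (l : List α) (i : Int) :
    PySem.List.pyGet? (l.map f) i = (PySem.List.pyGet? l i).map f := by
  simp [PySem.List.pyGet?, PySem.List.pyIdx?]

theorem readD_map_rA (g : List (Option PvGCell)) (j : Int) :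
    (PySem.List.pyGet? (g.map (Option.map rA)) j).getD none = (readD g j).map rA := by
  rw [pvGet_map, readD]
  cases PySem.List.pyGet? g j with
  | none => rfl
  | some o => cases o <;> rfl

theorem readD_map_rB (g : List (Option PvGCell)) (j : Int) :
    (PySem.List.pyGet? (g.map (Option.map rB)) j).getD none = (readD g j).map rB := by
  rw [pvGet_map, readD]
  cases PySem.List.pyGet? g j with
  | none => rfl
  | some o => cases o <;> rfl

-- one product entry of A on the rendered table simulates the ghost scan of pvH
theorem pvProdA_pair (g : List (Option PvGCell)) (i : Int) (b : Option PvGCell)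
    (e : Int × List PvEntry) :
    pvProdA (g.map (Option.map rA)) i (b.map rA, b.map (fun r => r.2.1)) e
      = (((pvH e).foldl (gScan g i) b).map rA,
         ((pvH e).foldl (gScan g i) b).map (fun r => r.2.1)) := by
  cases e with
  | mk p cl =>
    cases cl with
    | nil =>
      simp only [pvProdA, pvH, pvMinCombo, List.foldl_nil]
      split_ifs with hgt
      · rfl
      · rw [readD_map_rA]
        cases readD g (i - p) <;> rfl
    | cons c cl =>
      simp only [pvProdA, gScan, pvH, pvMinCombo_cons, List.foldl_cons, List.foldl_nil]
      split_ifs with hgt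
      · rfl
      · rw [readD_map_rA]
        cases h : readD g (i - p) with
        | none => rfl
        | some prev =>
          simp only [Option.map_some]
          rw [show pvStepA (rA prev) (b.map rA, b.map (fun r => r.2.1)) c
                = ((gCmp prev b (p, c)).map rA, (gCmp prev b (p, c)).map (fun r => r.2.1))
              from pvStepA_pair prev b p c]
          rw [pvFoldA_pair cl prev p, pvFoldB_min]

theorem pvFoldProd_pair (l : List (Int × List PvEntry)) (g : List (Option PvGCell)) (i : Int)
    (b : Option PvGCell) :
    l.foldl (pvProdA (g.map (Option.map rA)) i) (b.map rA, b.map (fun r => r.2.1))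
      = (((l.flatMap pvH).foldl (gScan g i) b).map rA,
         ((l.flatMap pvH).foldl (gScan g i) b).map (fun r => r.2.1)) := by
  induction l generalizing b with
  | nil => rfl
  | cons e l ih =>
    simp only [List.foldl_cons, List.flatMap_cons, List.foldl_append, pvProdA_pair]
    exact ih _

-- A's whole dp loop is the rA-rendered ghost loop
theorem pvOuterA (products : List (Int × List PvEntry)) (rl : List Int)
    (g : List (Option PvGCell)) :
    rl.foldl (fun dp i => dp.set i.toNat (products.foldl (pvProdA dp i) (none, none)).1)
        (g.map (Option.map rA))
      = (rl.foldl (fun g i => g.set i.toNat ((pvItems products).foldl (gScan g i) none)) g).map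
          (Option.map rA) := by
  induction rl generalizing g with
  | nil => rfl
  | cons i rl ih =>
    simp only [List.foldl_cons]
    rw [show (products.foldl (pvProdA (g.map (Option.map rA)) i) (none, none)).1
          = Option.map rA ((pvItems products).foldl (gScan g i) none) by
        rw [show ((none, none) : Option ((List PvEntry) × Int × Bool × Bool) × Option Int)
              = (Option.map rA (none : Option PvGCell),
                 Option.map (fun (r : PvGCell) => r.2.1) (none : Option PvGCell)) from rfl,
           pvFoldProd_pair, pvItems_eq]]
    rw [← List.map_set, ih]

-- ---------- B-side simulation ----------

theorem pvScan_pair (g : List (Option PvGCell)) (i : Int) (b : Option PvGCell)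
    (pe : Int × PvEntry) :
    pvScan (g.map (Option.map rB)) i (b.map rB) pe = (gScan g i b pe).map rB := by
  simp only [pvScan, gScan]
  split_ifs with hgt
  · rfl
  · rw [readD_map_rB]
    cases readD g (i - pe.1) with
    | none => rfl
    | some prev =>
      simp only [Option.map_some, gCmp, gStep]
      cases b with
      | none => rfl
      | some bb =>
        simp only [Option.map_some, rB]
        split_ifs <;> rfl

theorem pvFoldScan_pair (items : List (Int × PvEntry)) (g : List (Option PvGCell)) (i : Int)
    (b : Option PvGCell) :
    items.foldl (pvScan (g.map (Option.map rB)) i) (b.map rB)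
      = (items.foldl (gScan g i) b).map rB := by
  induction items generalizing b with
  | nil => rfl
  | cons pe items ih => simp only [List.foldl_cons, pvScan_pair, ih]

theorem pvOuterB (items : List (Int × PvEntry)) (rl : List Int) (g : List (Option PvGCell)) :
    rl.foldl (fun cost i => cost.set i.toNat (items.foldl (pvScan cost i) none))
        (g.map (Option.map rB))
      = (rl.foldl (fun g i => g.set i.toNat (items.foldl (gScan g i) none)) g).map
          (Option.map rB) := by
  induction rl generalizing g with
  | nil => rfl
  | cons i rl ih =>
    simp only [List.foldl_cons]
    rw [show (items.foldl (pvScan (g.map (Option.map rB)) i) none)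
          = (items.foldl (gScan g i) none).map rB from pvFoldScan_pair items g i none,
        ← List.map_set, ih]

-- ---------- well-formedness of the ghost table ----------

def gWF (items : List (Int × PvEntry)) (g : List (Option PvGCell)) : Prop :=
  ∀ (j : Int) (cell : PvGCell), 0 ≤ j → readD g j = some cell →
    (j = 0 ∧ cell = ([], 0, false, false)) ∨
    ∃ pe prev, pe ∈ items ∧ 0 < pe.1 ∧ pe.1 ≤ j ∧
      readD g (j - pe.1) = some prev ∧ cell = gStep prev pe

def gNone (g : List (Option PvGCell)) (k : Int) : Prop :=
  ∀ j : Int, k ≤ j → readD g j = none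

theorem readD_set (g : List (Option PvGCell)) (n : Nat) (v : Option PvGCell) (j : Int)
    (hj : 0 ≤ j) :
    readD (g.set n v) j
      = if j = (n : Int) ∧ (n : Int) < (g.length : Int) then v else readD g j := by
  unfold readD
  rw [PySem.List.pyGet?_of_nonneg _ hj, PySem.List.pyGet?_of_nonneg _ hj]
  rw [List.getElem?_set]
  by_cases h : n = j.toNat
  · by_cases hl : n < g.length
    · rw [if_pos h, if_pos hl, if_pos ⟨by omega, by exact_mod_cast hl⟩]
      cases v <;> rfl
    · rw [if_pos h, if_neg hl, if_neg (by omega), List.getElem?_eq_none (by omega)]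
  · rw [if_neg h, if_neg (by intro hc; exact h (by omega))]

theorem gScan_fold_cases (items : List (Int × PvEntry)) (g : List (Option PvGCell)) (i : Int)
    (acc : Option PvGCell) :
    items.foldl (gScan g i) acc = acc ∨
    ∃ pe prev, pe ∈ items ∧ ¬ pe.1 > i ∧ readD g (i - pe.1) = some prev ∧
      items.foldl (gScan g i) acc = some (gStep prev pe) := by
  induction items generalizing acc with
  | nil => exact Or.inl rfl
  | cons pe items ih =>
    simp only [List.foldl_cons]
    rcases ih (gScan g i acc pe) with h | ⟨pe', prev', hmem, hgt, hrd, hres⟩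
    · rw [h]
      unfold gScan
      split_ifs with hgt
      · exact Or.inl rfl
      · cases hrd : readD g (i - pe.1) with
        | none => exact Or.inl rfl
        | some prev =>
          simp only [gCmp]
          cases acc with
          | none =>
            exact Or.inr ⟨pe, prev, List.mem_cons_self, hgt, hrd, rfl⟩
          | some b =>
            dsimp only
            split_ifs with hlt
            · exact Or.inr ⟨pe, prev, List.mem_cons_self, hgt, hrd, rfl⟩
            · exact Or.inl rfl
    · exact Or.inr ⟨pe', prev', List.mem_cons_of_mem _ hmem, hgt, hrd, hres⟩

theorem gfold_inv (items : List (Int × PvEntry)) (b : Int) (n : Nat) :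
    ∀ (k : Int) (g : List (Option PvGCell)),
      (b - k).toNat = n → 1 ≤ k → k ≤ b → g.length = b.toNat → gNone g k → gWF items g →
      gWF items ((PySem.List.pyRange k b 1).foldl
        (fun g i => g.set i.toNat (items.foldl (gScan g i) none)) g) := by
  induction n with
  | zero =>
    intro k g hn h1 hkb hlen hnone hwf
    have hkb' : k = b := by omega
    rw [hkb', PySem.List.pyRange_one_eq_nil le_rfl]
    exact hwf
  | succ n ih =>
    intro k g hn h1 hkb hlen hnone hwf
    have hkb2 : k < b := by omega
    have hb0 : ((b.toNat : Int)) = b := by omega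
    have hkcast : ((k.toNat : Int)) = k := by omega
    rw [PySem.List.pyRange_one_cons hkb2]
    simp only [List.foldl_cons]
    have hread1 : ∀ j : Int, 0 ≤ j →
        readD (g.set k.toNat (items.foldl (gScan g k) none)) j
          = if j = k then items.foldl (gScan g k) none else readD g j := by
      intro j hj
      rw [readD_set g k.toNat _ j hj, hkcast, hlen, hb0]
      by_cases hjk : j = k
      · rw [if_pos ⟨hjk, by omega⟩, if_pos hjk]
      · rw [if_neg (by tauto), if_neg hjk]
    have hnone1 : gNone (g.set k.toNat (items.foldl (gScan g k) none)) (k + 1) := by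
      intro j hj
      rw [hread1 j (by omega), if_neg (by omega)]
      exact hnone j (by omega)
    have hwf1 : gWF items (g.set k.toNat (items.foldl (gScan g k) none)) := by
      intro j cell hj hcell
      rw [hread1 j hj] at hcell
      by_cases hjk : j = k
      · rw [if_pos hjk] at hcell
        rcases gScan_fold_cases items g k none with h | ⟨pe, prev, hmem, hgt, hrd, hres⟩
        · rw [h] at hcell; cases hcell
        · rw [hres] at hcell
          have hcell' : cell = gStep prev pe := by cases hcell; rfl
          have hpos : 0 < pe.1 := by
            by_contra hle
            have : readD g (k - pe.1) = none := hnone (k - pe.1) (by omega)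
            rw [this] at hrd; cases hrd
          refine Or.inr ⟨pe, prev, hmem, hpos, by omega, ?_, hcell'⟩
          rw [hread1 (j - pe.1) (by omega), if_neg (by omega), hjk]
          exact hrd
      · rw [if_neg hjk] at hcell
        rcases hwf j cell hj hcell with hbase | ⟨pe, prev, hmem, hpos, hle, hrd, hcelleq⟩
        · exact Or.inl hbase
        · refine Or.inr ⟨pe, prev, hmem, hpos, hle, ?_, hcelleq⟩
          rw [hread1 (j - pe.1) (by omega), if_neg ?_]
          · exact hrd
          · intro heq
            rw [heq, hnone k le_rfl] at hrd
            cases hrd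
    exact ih (k + 1) _ (by omega) (by omega) (by omega)
      (by rw [List.length_set]; exact hlen) hnone1 hwf1

theorem gTable_WF (items : List (Int × PvEntry)) (target : Int) (ht : 1 ≤ target) :
    gWF items (gTable target items) := by
  unfold gTable
  have hlen : ((List.replicate (target + 1).toNat (none : Option PvGCell)).set 0
      (some ([], 0, false, false))).length = (target + 1).toNat := by
    rw [List.length_set, List.length_replicate]
  have hrepl : ∀ j : Int, readD (List.replicate (target + 1).toNat (none : Option PvGCell)) j
      = none := by
    intro j
    unfold readD
    cases h : PySem.List.pyGet? (List.replicate (target + 1).toNat (none : Option PvGCell)) j with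
    | none => rfl
    | some x =>
      have hx : x ∈ List.replicate (target + 1).toNat (none : Option PvGCell) :=
        PySem.List.mem_of_pyGet?_eq_some _ h
      rw [List.eq_of_mem_replicate hx]
      rfl
  have hnone0 : gNone ((List.replicate (target + 1).toNat (none : Option PvGCell)).set 0
      (some ([], 0, false, false))) 1 := by
    intro j hj
    rw [readD_set _ 0 _ j (by omega), if_neg (by omega)]
    exact hrepl j
  have hwf0 : gWF items ((List.replicate (target + 1).toNat (none : Option PvGCell)).set 0
      (some ([], 0, false, false))) := by
    intro j cell hj hcell
    by_cases hj0 : j = 0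
    · subst hj0
      rw [readD_set _ 0 _ 0 le_rfl,
        if_pos ⟨by norm_num, by rw [List.length_replicate]; omega⟩] at hcell
      exact Or.inl ⟨rfl, by cases hcell; rfl⟩
    · rw [hnone0 j (by omega)] at hcell
      cases hcell
  exact gfold_inv items (target + 1) (target + 1 - 1).toNat 1 _ rfl le_rfl (by omega)
    hlen hnone0 hwf0

-- ---------- backtracking correctness ----------

theorem find_key_nodup (items : List (Int × PvEntry)) (pe : Int × PvEntry)
    (hnd : (items.map Prod.fst).Nodup) (hmem : pe ∈ items) :
    pvLookup items pe.1 = some pe.2 := by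
  induction items with
  | nil => cases hmem
  | cons q rest ih =>
    rw [List.map_cons, List.nodup_cons] at hnd
    unfold pvLookup
    by_cases hq : q.1 = pe.1
    · rcases List.mem_cons.mp hmem with rfl | hpm
      · simp
      · exact absurd (hq ▸ List.mem_map_of_mem hpm) hnd.1
    · rw [List.find?_cons_of_neg (by simpa using hq)]
      have hpm : pe ∈ rest := by
        rcases List.mem_cons.mp hmem with rfl | hpm
        · exact absurd rfl hq
        · exact hpm
      exact ih hnd.2 hpm

theorem walk_eq (items : List (Int × PvEntry)) (g : List (Option PvGCell))
    (hWF : gWF items g) (hnd : (items.map Prod.fst).Nodup) :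
    ∀ (fuel : Nat) (j : Int) (cell : PvGCell) (acc : List PvEntry),
      0 ≤ j → j ≤ (fuel : Int) → readD g j = some cell →
      pvWalk (g.map (Option.map rB)) items fuel j acc = acc ++ cell.1.map Prod.snd := by
  intro fuel
  induction fuel with
  | zero =>
    intro j cell acc hj hle hcell
    have hj0 : j = 0 := by omega
    subst hj0
    rcases hWF 0 cell le_rfl hcell with ⟨_, hc⟩ | ⟨pe, prev, _, hpos, hle', _, _⟩
    · subst hc; simp [pvWalk]
    · omega
  | succ fuel ih =>
    intro j cell acc hj hle hcell
    by_cases hj0 : 0 < j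
    · rcases hWF j cell (by omega) hcell with ⟨hj0', _⟩ | ⟨pe, prev, hmem, hpos, hle', hrd, hcelleq⟩
      · omega
      · subst hcelleq
        simp only [pvWalk]
        rw [if_pos hj0, readD_map_rB, hcell]
        simp only [Option.map_some, rB, gStep, List.headD_cons]
        rw [find_key_nodup items pe hnd hmem]
        dsimp only
        rw [ih (j - pe.1) prev (acc ++ [pe.2]) (by omega) (by omega) hrd]
        simp
    · have hj0' : j = 0 := by omega
      subst hj0'
      rcases hWF 0 cell le_rfl hcell with ⟨_, hc⟩ | ⟨pe, prev, _, hpos, hle', _, _⟩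
      · subst hc; simp [pvWalk]
      · omega

theorem flags_eq (items : List (Int × PvEntry)) (g : List (Option PvGCell))
    (hWF : gWF items g) :
    ∀ (fuel : Nat) (j : Int) (cell : PvGCell),
      0 ≤ j → j ≤ (fuel : Int) → readD g j = some cell →
      cell.2.2.1 = (cell.1.map Prod.snd).any (fun e => decide (0 < e.2.1)) ∧
      cell.2.2.2 = (cell.1.map Prod.snd).any (fun e => e.2.2) := by
  intro fuel
  induction fuel with
  | zero =>
    intro j cell hj hle hcell
    have hj0 : j = 0 := by omega
    subst hj0
    rcases hWF 0 cell le_rfl hcell with ⟨_, hc⟩ | ⟨pe, prev, _, hpos, hle', _, _⟩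
    · subst hc; simp
    · omega
  | succ fuel ih =>
    intro j cell hj hle hcell
    by_cases hj0 : 0 < j
    · rcases hWF j cell (by omega) hcell with ⟨hj0', _⟩ | ⟨pe, prev, hmem, hpos, hle', hrd, hcelleq⟩
      · omega
      · subst hcelleq
        obtain ⟨h1, h2⟩ := ih (j - pe.1) prev (by omega) (by omega) hrd
        constructor
        · simp only [gStep, List.map_cons, List.any_cons, h1]
          exact Bool.or_comm _ _
        · simp only [gStep, List.map_cons, List.any_cons, h2]
          exact Bool.or_comm _ _
    · have hj0' : j = 0 := by omega
      subst hj0'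
      rcases hWF 0 cell le_rfl hcell with ⟨_, hc⟩ | ⟨pe, prev, _, hpos, hle', _, _⟩
      · subst hc; simp
      · omega

theorem pvItems_keys_sublist (l : List (Int × List PvEntry)) :
    ((pvItems l).map Prod.fst).Sublist (l.map Prod.fst) := by
  rw [pvItems_eq]
  induction l with
  | nil => simp
  | cons e l ih =>
    simp only [List.flatMap_cons, List.map_append, List.map_cons]
    unfold pvH
    cases pvMinCombo e.2 with
    | none =>
      simp only [List.map_nil, List.nil_append]
      exact ih.trans (List.sublist_cons_self _ _)
    | some b =>
      simp only [List.map_cons, List.map_nil, List.singleton_append]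
      exact ih.cons₂ _

-- ===== VERDICT (by name: the statement is the Claim_ definition above) =====
theorem find_best_groups_spec : Claim_equal_find_best_groups := by
  intro target products _ hpre
  obtain ⟨_, hnd⟩ := hpre
  unfold Spec_find_best_groups find_best_groups find_best_groups_alt
  split_ifs with h0 hneg
  · rfl
  · rfl
  · dsimp only
    have ht : 1 ≤ target := by omega
    have hndI : ((pvItems products).map Prod.fst).Nodup :=
      (pvItems_keys_sublist products).nodup hnd
    have hWF : gWF (pvItems products) (gTable target (pvItems products)) :=
      gTable_WF (pvItems products) target ht
    rw [show (List.replicate (target + 1).toNat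
          (none : Option ((List (List Int × Int × Bool)) × Int × Bool × Bool))).set 0
          (some ([], 0, false, false))
        = ((List.replicate (target + 1).toNat (none : Option PvGCell)).set 0
          (some ([], 0, false, false))).map (Option.map rA) by
      rw [List.map_set, List.map_replicate]; rfl]
    rw [pvOuterA]
    rw [show (List.replicate (target + 1).toNat (none : Option (Int × Int))).set 0
          (some ((0 : Int), (0 : Int)))
        = ((List.replicate (target + 1).toNat (none : Option PvGCell)).set 0
          (some ([], 0, false, false))).map (Option.map rB) by
      rw [List.map_set, List.map_replicate]; rfl]
    rw [pvOuterB]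
    rw [show (PySem.List.pyRange 1 (target + 1) 1).foldl
          (fun g i => g.set i.toNat ((pvItems products).foldl (gScan g i) none))
          ((List.replicate (target + 1).toNat (none : Option PvGCell)).set 0
            (some ([], 0, false, false)))
        = gTable target (pvItems products) from rfl]
    rw [readD_map_rA, readD_map_rB]
    cases hcell : readD (gTable target (pvItems products)) target with
    | none => rfl
    | some cell =>
      simp only [Option.map_some]
      rw [walk_eq (pvItems products) _ hWF hndI target.toNat target cell []
        (by omega) (by omega) hcell]
      obtain ⟨ho, hd⟩ := flags_eq (pvItems products) _ hWF target.toNat target cell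
        (by omega) (by omega) hcell
      simp [rA, rB, List.any_reverse, ← ho, ← hd]
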